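-- pv_equiv track=rewrite | github.com/dltkdals224/Algorithm | Leetcode/Hash Table/890. Find and Replace Pattern.py | patterningWord
-- ===== SOURCE A (Python) =====
-- def patterningWord(word):
--     new_pattern_idx = 0
--     return_arr = []
--     dic = {}
--
--     for target in word:
--         if(target in dic):
--             return_arr.append(dic[target])
--         else:
--             dic[target] = new_pattern_idx
--             return_arr.append(new_pattern_idx)
--             new_pattern_idx += 1
--
--     return return_arr
-- ===== SOURCE B (Python) =====
-- def patterningWord(word):
--     # No running counter: a character's canonical index IS the number of distinct
--     # characters strictly before its first occurrence. Compute that formula once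
--     # per distinct character, then read it off for every position.
--     rank = {c: len(set(word[:word.index(c)])) for c in set(word)}
--     return [rank[c] for c in word]
-- ===== Notes on version B (the rewrite author's own statement) =====
-- stated objective: alternative
-- what changed: Drops the fused scan with a running counter entirely: a character's canonical index is computed directly by the closed formula len(set(word[:word.index(c)])) (distinct characters before its first occurrence), evaluated once per distinct character and then read off per position.
import Mathlib
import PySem

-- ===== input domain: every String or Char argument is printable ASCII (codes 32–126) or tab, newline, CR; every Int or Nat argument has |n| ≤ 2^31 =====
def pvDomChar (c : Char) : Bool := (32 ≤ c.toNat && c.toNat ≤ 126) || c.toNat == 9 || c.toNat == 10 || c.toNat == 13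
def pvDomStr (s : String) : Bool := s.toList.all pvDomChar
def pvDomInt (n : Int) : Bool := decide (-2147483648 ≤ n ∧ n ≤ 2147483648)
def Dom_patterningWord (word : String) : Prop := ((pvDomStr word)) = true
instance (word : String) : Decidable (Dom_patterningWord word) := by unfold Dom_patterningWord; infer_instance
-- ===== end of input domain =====

-- B drops A's dict and running counter: each character's canonical index is computed directly
-- as the number of distinct characters before its first occurrence (stateless, per character).

-- ===== PORT A =====
-- A's for-loop over word with state (dic, new_pattern_idx, return_arr).
-- dic[target] under the 'target in dic' guard is exact as getD (key is present).
def pwLoopA : List Char → PySem.Dict Char Int → Int → List Int → List Int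
  | [], _, _, acc => acc
  | c :: rest, dic, n, acc =>
    if dic.contains c then pwLoopA rest dic n (acc ++ [dic.getD c 0])
    else pwLoopA rest (dic.insert c n) (n + 1) (acc ++ [n])

def patterningWord (word : String) : List Int :=
  pwLoopA word.toList PySem.Dict.empty 0 []

-- ===== PORT B =====
-- rank = {c: len(set(word[:word.index(c)])) for c in set(word)}; return [rank[c] for c in word]
-- rank's value per key (set-of-prefix length at the first occurrence); word.index(c) is exact as
-- (index? …).getD 0 and rank[c] as getD (every key is present). The dict's contents do not depend
-- on set iteration order, so building it over PySem.Set's first-occurrence order is exact.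
def pwPrefixDistinct (word : String) (c : Char) : Int :=
  ((PySem.Set.ofList
      (PySem.List.slice word.toList none
        (some (((PySem.List.index? word.toList c).getD 0 : Nat) : Int)))).length : Int)

def patterningWord_alt (word : String) : List Int :=
  let rank : PySem.Dict Char Int :=
    (PySem.Set.ofList word.toList).foldl
      (fun d c => d.insert c (pwPrefixDistinct word c)) PySem.Dict.empty
  word.toList.map (fun c => rank.getD c 0)

-- ===== PRECONDITION & SPEC =====
def Spec_patterningWord (word : String) (out : List Int) : Prop := out = patterningWord_alt word
instance (word : String) (out : List Int) : Decidable (Spec_patterningWord word out) := by unfold Spec_patterningWord; infer_instance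

-- ===== CLAIM (what is proved, stated in full; the proofs are below) =====
def Claim_equal_patterningWord : Prop := ∀ (word : String), Dom_patterningWord word → Spec_patterningWord word (patterningWord word)

-- ===== LEMMAS AND PROOFS =====

-- first-occurrence index of c in xs, as an Int
def pwPos (xs : List Char) (c : Char) : Int :=
  (((PySem.List.index? xs c).getD 0 : Nat) : Int)

theorem pwPos_append_of_mem (xs t : List Char) (c : Char) (h : c ∈ xs) :
    pwPos (xs ++ t) c = pwPos xs c := by
  unfold pwPos
  rw [PySem.List.index?_append_of_mem t h]

theorem pwPos_append_singleton_self (xs : List Char) (c : Char) (h : c ∉ xs) :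
    pwPos (xs ++ [c]) c = (xs.length : Int) := by
  unfold pwPos
  rw [PySem.List.index?_append_singleton_self xs c h]
  simp

theorem pwPos_dedup_prefix (p l : List Char) (c : Char)
    (hc : c ∈ PySem.List.dedup p) :
    pwPos (PySem.List.dedup (p ++ l)) c = pwPos (PySem.List.dedup p) c := by
  rw [PySem.List.dedup_eq_ofList, PySem.List.dedup_eq_ofList, PySem.Set.ofList_append,
    PySem.Set.update_eq_append_filter]
  exact pwPos_append_of_mem _ _ _ (by simpa [PySem.List.dedup_eq_ofList] using hc)

theorem dedup_append_singleton_of_mem (p : List Char) (c : Char)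
    (hc : c ∈ PySem.List.dedup p) :
    PySem.List.dedup (p ++ [c]) = PySem.List.dedup p := by
  rw [PySem.List.dedup_eq_ofList, PySem.List.dedup_eq_ofList, PySem.Set.ofList_append_singleton]
  simp only [PySem.List.dedup_eq_ofList] at hc
  simp [PySem.Set.add, PySem.Set.contains, hc]

theorem dedup_append_singleton_of_not_mem (p : List Char) (c : Char)
    (hc : c ∉ PySem.List.dedup p) :
    PySem.List.dedup (p ++ [c]) = PySem.List.dedup p ++ [c] := by
  rw [PySem.List.dedup_eq_ofList, PySem.List.dedup_eq_ofList, PySem.Set.ofList_append_singleton]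
  simp only [PySem.List.dedup_eq_ofList] at hc
  simp [PySem.Set.add, PySem.Set.contains, hc]

theorem pwLoopA_spec (l : List Char) :
    ∀ (p : List Char) (d : PySem.Dict Char Int) (acc : List Int),
    (∀ c, d.contains c = decide (c ∈ PySem.List.dedup p)) →
    (∀ c, c ∈ PySem.List.dedup p → d.getD c 0 = pwPos (PySem.List.dedup p) c) →
    pwLoopA l d ((PySem.List.dedup p).length : Int) acc
      = acc ++ l.map (fun c => pwPos (PySem.List.dedup (p ++ l)) c) := by
  induction l with
  | nil => intro p d acc _ _; simp [pwLoopA]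
  | cons c rest ih =>
    intro p d acc hcon hval
    by_cases hc : c ∈ PySem.List.dedup p
    · have hcontains : d.contains c = true := by rw [hcon]; simpa using hc
      have hded : PySem.List.dedup (p ++ [c]) = PySem.List.dedup p :=
        dedup_append_singleton_of_mem p c hc
      simp only [pwLoopA, hcontains]
      rw [if_pos trivial]
      have := ih (p ++ [c]) d (acc ++ [d.getD c 0])
        (by intro c'; rw [hded]; exact hcon c')
        (by intro c' h'; rw [hded] at h' ⊢; exact hval c' h')
      rw [hded] at this
      rw [this]
      have hv : d.getD c 0 = pwPos (PySem.List.dedup (p ++ (c :: rest))) c := by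
        rw [hval c hc, pwPos_dedup_prefix p (c :: rest) c hc]
      rw [hv]
      simp [List.append_assoc]
    · have hcontains : d.contains c = false := by rw [hcon]; simpa using hc
      have hded : PySem.List.dedup (p ++ [c]) = PySem.List.dedup p ++ [c] :=
        dedup_append_singleton_of_not_mem p c hc
      simp only [pwLoopA, hcontains]
      rw [if_neg (by simp)]
      have := ih (p ++ [c]) (d.insert c ((PySem.List.dedup p).length : Int))
        (acc ++ [((PySem.List.dedup p).length : Int)])
        (by
          intro c'
          rw [PySem.Dict.contains_insert, hcon c', hded]
          by_cases h' : c' = c <;> simp [h'])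
        (by
          intro c' h'
          rw [hded] at h'
          rw [PySem.Dict.getD_insert, hded]
          by_cases h2 : c' = c
          · subst h2; rw [if_pos rfl, pwPos_append_singleton_self _ _ hc]
          · rw [if_neg h2]
            have hmem : c' ∈ PySem.List.dedup p := by
              rcases List.mem_append.mp h' with h3 | h3
              · exact h3
              · simp at h3; exact absurd h3 h2
            rw [pwPos_append_of_mem _ _ _ hmem]
            exact hval c' hmem)
      rw [hded] at this
      simp only [List.length_append, List.length_singleton] at this
      push_cast at this
      rw [this]
      have hv : ((PySem.List.dedup p).length : Int)
          = pwPos (PySem.List.dedup (p ++ (c :: rest))) c := by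
        have hcm : c ∈ PySem.List.dedup (p ++ [c]) := by
          rw [hded]; simp
        have h1 : pwPos (PySem.List.dedup ((p ++ [c]) ++ rest)) c
            = pwPos (PySem.List.dedup (p ++ [c])) c :=
          pwPos_dedup_prefix (p ++ [c]) rest c hcm
        rw [hded, pwPos_append_singleton_self _ _ hc] at h1
        rw [show p ++ (c :: rest) = (p ++ [c]) ++ rest by simp, h1]
      rw [hv]
      simp [List.append_assoc]

theorem patterningWord_eq_map (word : String) :
    patterningWord word = word.toList.map (fun c => pwPos (PySem.List.dedup word.toList) c) := by
  have := pwLoopA_spec word.toList [] PySem.Dict.empty []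
    (by intro c; simp [PySem.List.dedup, PySem.Dict.contains_empty])
    (by intro c h; simp [PySem.List.dedup] at h)
  simpa [patterningWord, PySem.List.dedup] using this

theorem pwPrefixDistinct_eq_pwPos (word : String) (c : Char) (hcw : c ∈ word.toList) :
    pwPrefixDistinct word c = pwPos (PySem.List.dedup word.toList) c := by
  unfold pwPrefixDistinct
  obtain ⟨k, hk⟩ := Option.isSome_iff_exists.mp
    ((PySem.List.index?_isSome_iff word.toList c).mpr hcw)
  obtain ⟨pre, suf, hsplit, hlen, hnot⟩ := (PySem.List.index?_eq_some_iff _ _ _).mp hk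
  rw [hk]
  simp only [Option.getD_some]
  rw [PySem.List.slice_to_natCast]
  -- word.toList.take k = pre
  have htake : word.toList.take k = pre := by
    rw [hsplit, ← hlen, List.take_left]
  rw [htake]
  -- right side: pwPos (dedup word) c = (dedup pre).length
  have hnotd : c ∉ PySem.List.dedup pre := by
    rw [PySem.List.mem_dedup]; exact hnot
  have hcm : c ∈ PySem.List.dedup (pre ++ [c]) := by
    rw [PySem.List.mem_dedup]; simp
  have h1 : pwPos (PySem.List.dedup ((pre ++ [c]) ++ suf)) c
      = pwPos (PySem.List.dedup (pre ++ [c])) c :=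
    pwPos_dedup_prefix (pre ++ [c]) suf c hcm
  rw [dedup_append_singleton_of_not_mem pre c hnotd,
    pwPos_append_singleton_self _ _ hnotd] at h1
  rw [hsplit, show pre ++ c :: suf = (pre ++ [c]) ++ suf by simp, h1]
  rw [← PySem.List.dedup_eq_ofList]

theorem alt_eq_map (word : String) :
    patterningWord_alt word = word.toList.map (fun c => pwPos (PySem.List.dedup word.toList) c) := by
  unfold patterningWord_alt
  set rank : PySem.Dict Char Int :=
    (PySem.Set.ofList word.toList).foldl
      (fun d c => d.insert c (pwPrefixDistinct word c)) PySem.Dict.empty with hrank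
  have hitems : rank.items
      = (PySem.Set.ofList word.toList).map (fun c => (c, pwPrefixDistinct word c)) := by
    rw [hrank]
    have := PySem.Dict.items_foldl_insert_fresh (PySem.Set.ofList word.toList)
      (fun c => c) (fun c => pwPrefixDistinct word c) PySem.Dict.empty
      (by intro a _; exact PySem.Dict.contains_empty _)
      (by simpa using PySem.Set.nodup_ofList word.toList)
    simpa using this
  have hkeys : rank.keys.Nodup := by
    have : rank.keys = PySem.Set.ofList word.toList := by
      unfold PySem.Dict.keys
      rw [hitems, List.map_map]
      simp [Function.comp_def]
    rw [this]; exact PySem.Set.nodup_ofList word.toList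
  apply List.map_congr_left
  intro c hcw
  have hmem : (c, pwPrefixDistinct word c) ∈ rank.items := by
    rw [hitems]
    exact List.mem_map.mpr ⟨c, by simpa [PySem.Set.mem_ofList] using hcw, rfl⟩
  rw [PySem.Dict.getD_of_mem_items rank hmem hkeys]
  exact pwPrefixDistinct_eq_pwPos word c hcw

-- ===== VERDICT (by name: the statement is the Claim_ definition above) =====
theorem patterningWord_spec : Claim_equal_patterningWord := by
  intro word _
  unfold Spec_patterningWord
  rw [patterningWord_eq_map, alt_eq_map]
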